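-- pv_equiv track=rewrite | github.com/Oh64/Yam | main_func.py | IsAGS
-- ===== SOURCE A (Python) =====
-- def IsAGS(des):
--     '''Regarde s'il y a une grande suite (2 à 6) dans les dés.'''
--     suite = 2
--     restart = 1
--
--     while restart == 1:
--         restart = 0
--         for de in des:
--             if de == suite:
--                 suite += 1
--                 restart = 1
--
--     return suite == 7  # Si on a trouvé tous les numéros jusqu'à 6
-- ===== SOURCE B (Python) =====
-- def IsAGS(des):
--     '''Regarde s'il y a une grande suite (2 à 6) dans les dés.'''
--     return {2, 3, 4, 5, 6}.issubset(set(des))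
-- ===== Notes on version B (the rewrite author's own statement) =====
-- stated objective: simpler
-- what changed: Replaces A's restarting rescan loop with a moving 'suite' counter by building the set of dice values once and testing that {2,3,4,5,6} is a subset of it.
-- intended difference: On inputs containing all of 2,3,4,5,6 and also 7, A's counter runs past 7 and A returns False although the straight 2-6 is present; B returns True, which is the intended answer for 'is the large straight 2-6 in the dice'. — e.g. on IsAGS([2, 3, 4, 5, 6, 7]): A returns false, B returns true
import Mathlib
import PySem

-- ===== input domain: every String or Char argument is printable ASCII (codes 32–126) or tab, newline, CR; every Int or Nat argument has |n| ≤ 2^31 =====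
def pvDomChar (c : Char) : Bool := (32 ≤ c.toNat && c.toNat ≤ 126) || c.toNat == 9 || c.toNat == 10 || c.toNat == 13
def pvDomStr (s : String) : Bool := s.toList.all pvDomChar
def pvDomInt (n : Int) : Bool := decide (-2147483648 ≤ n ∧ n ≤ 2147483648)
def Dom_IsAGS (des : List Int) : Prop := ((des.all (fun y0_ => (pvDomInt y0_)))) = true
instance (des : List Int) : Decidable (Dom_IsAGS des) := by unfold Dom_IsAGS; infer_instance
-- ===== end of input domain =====

-- B builds the set of dice values once and tests {2,3,4,5,6} ⊆ it (simpler than A's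
-- restarting rescan loop); on inputs containing all of 2..6 AND 7, A returns False
-- (its counter runs past 7) while B returns the intended True — stated as D_ below.

-- ===== PORT A =====
-- the inner 'for de in des' pass: state = (suite, restart)
def agsStep (st : Int × Bool) (de : Int) : Int × Bool :=
  if de = st.1 then (st.1 + 1, true) else st

-- the 'while restart == 1' loop, fueled; each restarting pass strictly increases
-- suite through a member of des, so des.length + 1 passes always suffice (proved below)
def agsLoop (des : List Int) : Nat → Int → Int
  | 0, suite => suite
  | n + 1, suite =>
      let st := des.foldl agsStep (suite, false)
      if st.2 then agsLoop des n st.1 else st.1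

def IsAGS (des : List Int) : Bool := decide (agsLoop des (des.length + 1) 2 = 7)

-- ===== PORT B =====
def IsAGS_alt (des : List Int) : Bool :=
  PySem.Set.issubset (PySem.Set.ofList [(2 : Int), 3, 4, 5, 6]) (PySem.Set.ofList des)

-- ===== PRECONDITION & SPEC =====
-- On inputs containing all of 2,3,4,5,6 and also 7, A's counter runs past 7 and A
-- returns False although the straight 2-6 is present; B returns True, the intended
-- answer for "is the large straight 2-6 in the dice".
def D_IsAGS (des : List Int) : Prop :=
  (2 : Int) ∈ des ∧ (3 : Int) ∈ des ∧ (4 : Int) ∈ des ∧ (5 : Int) ∈ des ∧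
  (6 : Int) ∈ des ∧ (7 : Int) ∈ des
instance (des : List Int) : Decidable (D_IsAGS des) := by unfold D_IsAGS; infer_instance

def Spec_IsAGS (des : List Int) (out : Bool) : Prop := ¬ D_IsAGS des → out = IsAGS_alt des
instance (des : List Int) (out : Bool) : Decidable (Spec_IsAGS des out) := by
  unfold Spec_IsAGS; infer_instance

def pvDiffWitness_IsAGS : List Int := [2, 3, 4, 5, 6, 7]
def pvDiffWitnessOut_IsAGS : Bool × Bool := (false, true)

-- ===== CLAIM (what is proved, stated in full; the proofs are below) =====
def Claim_unchanged_IsAGS : Prop := ∀ (des : List Int), Dom_IsAGS des → Spec_IsAGS des (IsAGS des)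
def Claim_changed_IsAGS : Prop :=
  Dom_IsAGS (pvDiffWitness_IsAGS) ∧ D_IsAGS (pvDiffWitness_IsAGS) ∧
  IsAGS (pvDiffWitness_IsAGS) = pvDiffWitnessOut_IsAGS.1 ∧
  IsAGS_alt (pvDiffWitness_IsAGS) = pvDiffWitnessOut_IsAGS.2 ∧
  pvDiffWitnessOut_IsAGS.1 ≠ pvDiffWitnessOut_IsAGS.2
def Claim_exact_IsAGS : Prop :=
  ∀ (des : List Int), Dom_IsAGS des → D_IsAGS des → IsAGS des ≠ IsAGS_alt des

-- ===== LEMMAS AND PROOFS =====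

-- the pass never decreases suite
theorem agsFold_le (des : List Int) : ∀ (s : Int) (b : Bool),
    s ≤ (des.foldl agsStep (s, b)).1 := by
  induction des with
  | nil => intro s b; simp
  | cons d t ih =>
      intro s b
      simp only [List.foldl_cons, agsStep]
      by_cases h : d = s
      · rw [if_pos h]
        have := ih (s + 1) true
        omega
      · rw [if_neg h]
        exact ih s b

-- every value the pass steps through is a member of des
theorem agsFold_mem (des : List Int) : ∀ (s : Int) (b : Bool) (v : Int),
    s ≤ v → v < (des.foldl agsStep (s, b)).1 → v ∈ des := by
  induction des with
  | nil => intro s b v h1 h2; simp at h2; omega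
  | cons d t ih =>
      intro s b v h1 h2
      simp only [List.foldl_cons, agsStep] at h2
      by_cases h : d = s
      · rw [if_pos h] at h2
        by_cases hv : v = s
        · subst hv; subst h; exact List.mem_cons_self
        · exact List.mem_cons_of_mem _ (ih (s + 1) true v (by omega) h2)
      · simp only [if_neg h] at h2
        exact List.mem_cons_of_mem _ (ih s b v h1 h2)

-- once the restart flag is set it stays set
theorem agsFold_true (des : List Int) : ∀ (s : Int),
    (des.foldl agsStep (s, true)).2 = true := by
  induction des with
  | nil => intro s; simp
  | cons d t ih =>
      intro s
      simp only [List.foldl_cons, agsStep]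
      by_cases h : d = s
      · rw [if_pos h]; exact ih (s + 1)
      · rw [if_neg h]; exact ih s

-- a pass that does not restart leaves suite unchanged and suite ∉ des
theorem agsFold_false (des : List Int) : ∀ (s : Int),
    (des.foldl agsStep (s, false)).2 = false →
    (des.foldl agsStep (s, false)).1 = s ∧ s ∉ des := by
  induction des with
  | nil => intro s _; simp
  | cons d t ih =>
      intro s h
      simp only [List.foldl_cons, agsStep] at h ⊢
      by_cases hd : d = s
      · rw [if_pos hd] at h; rw [agsFold_true] at h; exact absurd h (by simp)
      · rw [if_neg hd] at h ⊢
        obtain ⟨h1, h2⟩ := ih s h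
        refine ⟨h1, fun hmem => ?_⟩
        rcases List.mem_cons.mp hmem with h' | h'
        · exact hd h'.symm
        · exact h2 h'

-- a pass that restarts matched suite itself and strictly increased it
theorem agsFold_restart (des : List Int) : ∀ (s : Int),
    (des.foldl agsStep (s, false)).2 = true →
    s ∈ des ∧ s + 1 ≤ (des.foldl agsStep (s, false)).1 := by
  induction des with
  | nil => intro s h; simp at h
  | cons d t ih =>
      intro s h
      simp only [List.foldl_cons, agsStep] at h ⊢
      by_cases hd : d = s
      · rw [if_pos hd] at h ⊢
        exact ⟨by rw [hd]; exact List.mem_cons_self, agsFold_le t (s + 1) true⟩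
      · rw [if_neg hd] at h ⊢
        obtain ⟨h1, h2⟩ := ih s h
        exact ⟨List.mem_cons_of_mem _ h1, h2⟩

-- strictly fewer deduplicated members of des remain at or above s' than at or above s
theorem agsMeasure_lt (des : List Int) (s s' : Int) (hmem : s ∈ des) (hlt : s < s') :
    (des.dedup.filter (fun v => decide (s' ≤ v))).length <
      (des.dedup.filter (fun v => decide (s ≤ v))).length := by
  have hsub : List.Sublist (des.dedup.filter (fun v => decide (s' ≤ v)))
      (des.dedup.filter (fun v => decide (s ≤ v))) :=
    List.monotone_filter_right _ (fun a ha => by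
      simp only [decide_eq_true_eq] at *; omega)
  have hle := hsub.length_le
  rcases eq_or_lt_of_le hle with heq | h
  · exfalso
    have := hsub.eq_of_length (by omega)
    have hs : s ∈ des.dedup.filter (fun v => decide (s ≤ v)) := by
      simp [List.mem_dedup, hmem]
    rw [← this] at hs
    simp at hs
    omega
  · exact h

-- one unfolding step of the fueled while-loop
theorem agsLoop_succ (des : List Int) (n : Nat) (s : Int) :
    agsLoop des (n + 1) s =
      (if (des.foldl agsStep (s, false)).2 then agsLoop des n (des.foldl agsStep (s, false)).1
       else (des.foldl agsStep (s, false)).1) := rfl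

-- main loop invariant: with enough fuel the loop ends at a value L ∉ des with every
-- value in [s, L) a member of des
theorem agsLoop_spec (des : List Int) : ∀ (fuel : Nat) (s : Int),
    (des.dedup.filter (fun v => decide (s ≤ v))).length < fuel →
    agsLoop des fuel s ∉ des ∧
    (∀ v, s ≤ v → v < agsLoop des fuel s → v ∈ des) ∧
    s ≤ agsLoop des fuel s := by
  intro fuel
  induction fuel with
  | zero => intro s h; omega
  | succ n ih =>
      intro s hfuel
      rw [agsLoop_succ]
      cases hr : (des.foldl agsStep (s, false)).2 with
      | false =>
          rw [if_neg (by simp)]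
          obtain ⟨h1, h2⟩ := agsFold_false des s hr
          rw [h1]
          exact ⟨h2, fun v hv1 hv2 => absurd hv2 (by omega), le_refl s⟩
      | true =>
          rw [if_pos rfl]
          obtain ⟨hmem, hinc⟩ := agsFold_restart des s hr
          set s' := (des.foldl agsStep (s, false)).1 with hs'
          have hm : (des.dedup.filter (fun v => decide (s' ≤ v))).length < n := by
            have := agsMeasure_lt des s s' hmem (by omega)
            omega
          obtain ⟨h1, h2, h3⟩ := ih s' hm
          refine ⟨h1, fun v hv1 hv2 => ?_, by omega⟩
          by_cases hvs : v < s'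
          · exact agsFold_mem des s false v hv1 hvs
          · exact h2 v (by omega) hv2

-- the fuel des.length + 1 used by the port is always sufficient
theorem agsLoop_full (des : List Int) :
    agsLoop des (des.length + 1) 2 ∉ des ∧
    (∀ v, 2 ≤ v → v < agsLoop des (des.length + 1) 2 → v ∈ des) ∧
    (2 : Int) ≤ agsLoop des (des.length + 1) 2 := by
  apply agsLoop_spec
  have h1 : (des.dedup.filter (fun v => decide ((2 : Int) ≤ v))).length ≤ des.dedup.length :=
    List.length_filter_le _ _
  have h2 : des.dedup.length ≤ des.length := des.dedup_sublist.length_le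
  omega

theorem alt_iff (des : List Int) :
    IsAGS_alt des = true ↔
      ((2 : Int) ∈ des ∧ (3 : Int) ∈ des ∧ (4 : Int) ∈ des ∧ (5 : Int) ∈ des ∧
        (6 : Int) ∈ des) := by
  unfold IsAGS_alt
  rw [PySem.Set.issubset_iff]
  simp only [PySem.Set.mem_ofList, List.mem_cons, List.not_mem_nil, or_false]
  constructor
  · intro h
    exact ⟨h 2 (by tauto), h 3 (by tauto), h 4 (by tauto), h 5 (by tauto), h 6 (by tauto)⟩
  · rintro ⟨h2, h3, h4, h5, h6⟩ x hx
    rcases hx with rfl | rfl | rfl | rfl | rfl <;> assumption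

-- ===== VERDICT (by name: the statement is the Claim_ definition above) =====
theorem IsAGS_spec : Claim_unchanged_IsAGS := by
  intro des _ hnD
  obtain ⟨hnot, hmem, hge⟩ := agsLoop_full des
  unfold IsAGS
  by_cases hall : ((2 : Int) ∈ des ∧ (3 : Int) ∈ des ∧ (4 : Int) ∈ des ∧ (5 : Int) ∈ des ∧
      (6 : Int) ∈ des)
  · have h7 : (7 : Int) ∉ des := by
      intro h7
      exact hnD ⟨hall.1, hall.2.1, hall.2.2.1, hall.2.2.2.1, hall.2.2.2.2, h7⟩
    have hL7 : agsLoop des (des.length + 1) 2 = 7 := by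
      by_contra hne
      rcases lt_or_gt_of_ne hne with h | h
      · -- the final suite is < 7, hence one of 2..6, hence ∈ des: contradiction
        obtain ⟨a2, a3, a4, a5, a6⟩ := hall
        have hcases : agsLoop des (des.length + 1) 2 = 2 ∨
            agsLoop des (des.length + 1) 2 = 3 ∨ agsLoop des (des.length + 1) 2 = 4 ∨
            agsLoop des (des.length + 1) 2 = 5 ∨ agsLoop des (des.length + 1) 2 = 6 := by
          omega
        rcases hcases with h' | h' | h' | h' | h' <;> rw [h'] at hnot <;> exact hnot (by assumption)
      · exact h7 (hmem 7 (by omega) (by omega))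
    rw [decide_eq_true hL7, eq_comm, alt_iff]
    exact hall
  · have hLne : agsLoop des (des.length + 1) 2 ≠ 7 := by
      intro hL7
      exact hall ⟨hmem 2 (by omega) (by omega), hmem 3 (by omega) (by omega),
        hmem 4 (by omega) (by omega), hmem 5 (by omega) (by omega),
        hmem 6 (by omega) (by omega)⟩
    rw [decide_eq_false hLne, eq_comm, ← Bool.not_eq_true, alt_iff]
    exact hall

theorem IsAGS_changed : Claim_changed_IsAGS := by unfold Claim_changed_IsAGS; decide

theorem IsAGS_tight : Claim_exact_IsAGS := by
  intro des _ hD heq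
  obtain ⟨h2, h3, h4, h5, h6, h7⟩ := hD
  have halt : IsAGS_alt des = true := (alt_iff des).mpr ⟨h2, h3, h4, h5, h6⟩
  rw [halt] at heq
  obtain ⟨hnot, _, _⟩ := agsLoop_full des
  unfold IsAGS at heq
  have hL7 : agsLoop des (des.length + 1) 2 = 7 := of_decide_eq_true heq
  rw [hL7] at hnot
  exact hnot h7
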